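-- pv_equiv track=rewrite | github.com/bobxiong88/Competitive-Programming-Solutions | DMOJ solutions/Uncategorized/factorial.py | f
-- ===== SOURCE A (Python) =====
-- def f(n, mod):
--     if n>=mod:
--         return 0
--     if n>=34:
--         return 0
--     ans = 1
--     for i in range(1,n+1):
--         ans = (ans*i)%mod
--     return ans
-- ===== SOURCE B (Python) =====
-- def _fact(k, mod):
--     if k <= 0:
--         return 1
--     return (_fact(k - 1, mod) * k) % mod
--
-- def f(n, mod):
--     if n >= mod:
--         return 0
--     if n >= 34:
--         return 0
--     return _fact(n, mod)
-- ===== Notes on version B (the rewrite author's own statement) =====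
-- stated objective: alternative
-- what changed: Replaces the accumulating for-loop over range(1,n+1) with the textbook recursive recurrence fact(k) = (fact(k-1)*k) % mod with base case k<=0.
import Mathlib
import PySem

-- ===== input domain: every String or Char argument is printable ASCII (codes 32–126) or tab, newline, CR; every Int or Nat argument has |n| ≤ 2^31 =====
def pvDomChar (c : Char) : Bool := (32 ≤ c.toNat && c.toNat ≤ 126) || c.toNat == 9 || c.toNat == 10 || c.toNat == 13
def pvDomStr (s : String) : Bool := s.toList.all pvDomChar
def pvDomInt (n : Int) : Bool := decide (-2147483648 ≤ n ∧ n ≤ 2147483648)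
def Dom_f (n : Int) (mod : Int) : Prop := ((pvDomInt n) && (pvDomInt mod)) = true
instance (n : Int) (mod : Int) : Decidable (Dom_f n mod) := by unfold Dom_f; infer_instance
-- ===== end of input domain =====

-- B replaces A's accumulating for-loop by the textbook recursive recurrence; same cost (loop capped at 33 steps).

-- ===== PORT A =====
def f (n : Int) (mod : Int) : Int :=
  if n ≥ mod then 0
  else if n ≥ 34 then 0
  else (PySem.List.pyRange 1 (n + 1) 1).foldl (fun ans i => PySem.Int.mod (ans * i) mod) 1

-- ===== PORT B =====
def factRec (k : Int) (mod : Int) : Int :=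
  if k ≤ 0 then 1
  else PySem.Int.mod (factRec (k - 1) mod * k) mod
termination_by k.toNat
decreasing_by omega

def f_alt (n : Int) (mod : Int) : Int :=
  if n ≥ mod then 0
  else if n ≥ 34 then 0
  else factRec n mod

-- ===== PRECONDITION & SPEC =====
def Spec_f (n : Int) (mod : Int) (out : Int) : Prop := out = f_alt n mod
instance (n : Int) (mod : Int) (out : Int) : Decidable (Spec_f n mod out) := by unfold Spec_f; infer_instance

-- ===== CLAIM (what is proved, stated in full; the proofs are below) =====
def Claim_equal_f : Prop := ∀ (n : Int) (mod : Int), Dom_f n mod → Spec_f n mod (f n mod)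

-- ===== LEMMAS AND PROOFS =====

theorem fold_eq_factRec (mod : Int) (m : Nat) :
    (PySem.List.pyRange 1 ((m : Int) + 1) 1).foldl
      (fun ans i => PySem.Int.mod (ans * i) mod) 1 = factRec (m : Int) mod := by
  induction m with
  | zero =>
    rw [PySem.List.pyRange_one_eq_nil (by norm_num)]
    simp [factRec]
  | succ m ih =>
    have h1 : (1 : Int) ≤ (m : Int) + 1 := by omega
    have hc : ((m + 1 : Nat) : Int) + 1 = ((m : Int) + 1) + 1 := by push_cast; ring
    rw [hc, PySem.List.pyRange_one_succ_right h1, List.foldl_append, ih]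
    have hc2 : ((m + 1 : Nat) : Int) = (m : Int) + 1 := by push_cast; ring
    rw [hc2]
    conv_rhs => rw [factRec]
    have h : ¬ ((m : Int) + 1 ≤ 0) := by omega
    rw [if_neg h]
    have hc3 : (m : Int) + 1 - 1 = (m : Int) := by ring
    rw [hc3]
    simp

theorem factRec_of_nonpos (mod n : Int) (h : n ≤ 0) : factRec n mod = 1 := by
  rw [factRec, if_pos h]

-- ===== VERDICT (by name: the statement is the Claim_ definition above) =====
theorem f_spec : Claim_equal_f := by
  intro n mod _
  unfold Spec_f f f_alt
  split_ifs with h1 h2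
  · rfl
  · rfl
  · rcases le_or_gt 0 n with hn | hn
    · have : n = ((n.toNat : Nat) : Int) := by omega
      rw [this, ← fold_eq_factRec]
    · rw [PySem.List.pyRange_one_eq_nil (by omega)]
      simp [factRec_of_nonpos mod n (by omega)]
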